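-- pv_equiv track=rewrite | github.com/monxpronx/Coding-Test | 프로그래머스/0/120871. 저주의 숫자 3/저주의 숫자 3.py | solution
-- ===== SOURCE A (Python) =====
-- def solution(n):
--     answer = 1
--     cnt = 0
--
--     while cnt < n:
--         if (answer % 3 != 0) and ('3' not in str(answer)):
--             cnt+=1
--         if cnt==n:
--             break
--         answer+=1
--
--     return answer
-- ===== SOURCE B (Python) =====
-- def from9(k):
--     # k-th positive integer containing no digit 3 (k >= 1):
--     # write k in base 9 and map each digit d -> d if d < 3 else d + 1.
--     v = 0
--     p = 1
--     while k > 0: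
--         d = k % 9
--         if d >= 3:
--             d += 1
--         v += d * p
--         p *= 10
--         k //= 9
--     return v
--
--
-- def solution(n):
--     # Walk only through the numbers without digit 3 (the image of from9),
--     # skipping every digit-3 number A scans one by one.
--     cnt = 0
--     k = 0
--     v = 1
--     while cnt < n:
--         k += 1
--         v = from9(k)
--         if v % 3 != 0:
--             cnt += 1
--     return v
-- ===== Notes on version B (the rewrite author's own statement) =====
-- stated objective: alternative
-- what changed: Instead of scanning every integer and testing its decimal string for '3', B enumerates only the numbers containing no digit 3 (the k-th such number is obtained by writing k in base 9 and mapping digits 0,1,2,4,...,9), counting those not divisible by 3.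
import Mathlib
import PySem

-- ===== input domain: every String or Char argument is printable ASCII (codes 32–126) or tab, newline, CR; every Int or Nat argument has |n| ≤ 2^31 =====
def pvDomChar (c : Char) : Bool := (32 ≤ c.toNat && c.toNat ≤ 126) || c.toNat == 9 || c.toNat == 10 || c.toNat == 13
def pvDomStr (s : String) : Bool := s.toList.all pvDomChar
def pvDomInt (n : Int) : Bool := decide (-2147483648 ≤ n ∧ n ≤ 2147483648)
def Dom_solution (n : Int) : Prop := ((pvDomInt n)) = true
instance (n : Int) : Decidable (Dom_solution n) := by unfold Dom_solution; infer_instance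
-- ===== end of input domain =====

-- B iterates only over the numbers that contain no digit 3 (generated by base-9 counting)
-- instead of scanning every integer and testing its decimal string; objective: alternative.

-- ===== PORT A =====
-- A's loop test `(answer % 3 != 0) and ('3' not in str(answer))`, named so the
-- termination measure below can refer to it.
def pvAValid (a : Int) : Bool :=
  decide (PySem.Int.mod a 3 ≠ 0) && !(PySem.Str.isIn "3" (PySem.Int.toStr a))

-- digit bridge lemmas, needed (through pvAValid_exists) by the port's termination argument
lemma pvDigitChar_eq_three (d : ℕ) (hd : d < 10) : Nat.digitChar d = '3' ↔ d = 3 := by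
  interval_cases d <;> decide

lemma pvMemToDigitsCore : ∀ (f n : ℕ) (ds : List Char), n < 10 ^ f →
    ('3' ∈ Nat.toDigitsCore 10 f n ds ↔ 3 ∈ Nat.digits 10 n ∨ '3' ∈ ds) := by
  intro f
  induction f with
  | zero =>
    intro n ds h
    interval_cases n
    simp [Nat.toDigitsCore]
  | succ f ih =>
    intro n ds h
    rw [Nat.toDigitsCore]
    have hdc : ('3' = (n % 10).digitChar) ↔ 3 = n % 10 := by
      rw [eq_comm, pvDigitChar_eq_three _ (Nat.mod_lt n (by norm_num)), eq_comm]
    by_cases h0 : n / 10 = 0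
    · have hn10 : n < 10 := by omega
      simp only [h0, if_true]
      rcases Nat.eq_zero_or_pos n with hn | hn
      · subst hn
        have hch : (0 % 10).digitChar = '0' := by decide
        rw [hch, Nat.digits_zero]
        simp only [List.mem_cons, List.not_mem_nil, false_or]
        constructor
        · rintro (hc | hc)
          · exact absurd hc (by decide)
          · exact hc
        · exact fun hc => Or.inr hc
      · rw [Nat.digits_def' (by norm_num : (1:ℕ) < 10) hn]
        have hnil : Nat.digits 10 (n / 10) = [] := by rw [h0]; simp
        simp [hnil, hdc]
    · simp only [h0, if_false]
      have hlt : n / 10 < 10 ^ f := by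
        rw [Nat.div_lt_iff_lt_mul (by norm_num)]
        calc n < 10 ^ (f + 1) := h
        _ = 10 ^ f * 10 := by ring
      rw [ih (n / 10) _ hlt]
      have hn : 0 < n := by by_contra hc; omega
      rw [Nat.digits_def' (by norm_num : (1:ℕ) < 10) hn]
      simp only [List.mem_cons, hdc]
      tauto

lemma pvMemToDigits (m : ℕ) : '3' ∈ Nat.toDigits 10 m ↔ 3 ∈ Nat.digits 10 m := by
  have := pvMemToDigitsCore (m + 1) m [] (by
    calc m < m + 1 := Nat.lt_succ_self m
    _ ≤ 10 ^ (m + 1) := (Nat.lt_pow_self (by norm_num)).le)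
  unfold Nat.toDigits
  simpa using this

lemma pvSingletonInfix (c : Char) (l : List Char) : [c] <:+: l ↔ c ∈ l := by
  constructor
  · intro h; exact h.sublist.mem (by simp)
  · intro h
    obtain ⟨s, t, rfl⟩ := List.append_of_mem h
    exact ⟨s, t, by simp⟩

-- pvAValid ↑v decides "v not divisible by 3 and no decimal digit 3"
lemma pvAValid_coe (v : ℕ) :
    pvAValid (v : Int) = true ↔ (¬ (3 ∣ v) ∧ 3 ∉ Nat.digits 10 v) := by
  unfold pvAValid
  rw [Bool.and_eq_true, decide_eq_true_iff, Bool.not_eq_true', ← Bool.not_eq_true,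
    PySem.Str.isIn_iff_infix]
  have h1 : PySem.Int.mod (v : Int) 3 ≠ 0 ↔ ¬ (3 ∣ v) := by
    rw [ne_eq, PySem.Int.mod_eq_zero_iff_dvd]
    exact not_congr (by exact_mod_cast Int.natCast_dvd_natCast)
  have h2 : (PySem.Int.toStr (v : Int)).toList = Nat.toDigits 10 v := by
    rw [PySem.Int.toList_toStr]
    unfold PySem.Int.toChars
    rw [if_neg (by omega)]
    simp
  rw [h1, h2]
  have : ("3" : String).toList = ['3'] := by decide
  rw [this, pvSingletonInfix, pvMemToDigits]

lemma pvNo3_pow10 : ∀ m : ℕ, 3 ∉ Nat.digits 10 (10 ^ m) := by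
  intro m
  induction m with
  | zero => decide
  | succ m ih =>
    rw [Nat.digits_def' (by norm_num : (1:ℕ) < 10) (by positivity)]
    have h1 : 10 ^ (m + 1) % 10 = 0 := by
      simp [Nat.pow_succ, Nat.mul_mod_left]
    have h2 : 10 ^ (m + 1) / 10 = 10 ^ m := by
      rw [Nat.pow_succ, Nat.mul_div_cancel _ (by norm_num)]
    rw [h1, h2]
    intro hmem
    rcases List.mem_cons.mp hmem with hc | hc
    · exact absurd hc (by norm_num)
    · exact ih hc

lemma pvNo3_pow10_add_one : ∀ m : ℕ, 3 ∉ Nat.digits 10 (10 ^ m + 1) := by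
  intro m
  cases m with
  | zero => decide
  | succ m =>
    rw [Nat.digits_def' (by norm_num : (1:ℕ) < 10) (by positivity)]
    have hps : 10 ^ (m + 1) = 10 * 10 ^ m := by ring
    have h1 : (10 ^ (m + 1) + 1) % 10 = 1 := by omega
    have h2 : (10 ^ (m + 1) + 1) / 10 = 10 ^ m := by omega
    rw [h1, h2]
    intro hmem
    rcases List.mem_cons.mp hmem with hc | hc
    · exact absurd hc (by norm_num)
    · exact pvNo3_pow10 m hc

lemma pvPow10_mod3 (m : ℕ) : 10 ^ m % 3 = 1 := by
  rw [Nat.pow_mod]; simp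

-- there is always a later number passing A's test: 10^m + 1 for m large enough
lemma pvAValid_exists (a : Int) : ∃ j : ℕ, pvAValid (a + (j : Int)) = true := by
  set m : ℕ := a.toNat + 1 with hm
  have hbig : a < ((10 ^ m + 1 : ℕ) : Int) := by
    have h1 : (m : Int) < ((10 ^ m + 1 : ℕ) : Int) := by
      exact_mod_cast Nat.lt_succ_of_lt (Nat.lt_pow_self (by norm_num))
    have h2 : a ≤ (a.toNat : Int) := Int.self_le_toNat a
    have h3 : (a.toNat : Int) < (m : Int) := by exact_mod_cast Nat.lt_succ_self a.toNat
    exact lt_of_le_of_lt h2 (lt_trans h3 h1)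
  refine ⟨(((10 ^ m + 1 : ℕ) : Int) - a).toNat, ?_⟩
  have harg : a + ((((10 ^ m + 1 : ℕ) : Int) - a).toNat : Int) = ((10 ^ m + 1 : ℕ) : Int) := by
    rw [Int.toNat_of_nonneg (sub_nonneg.mpr hbig.le), add_sub_cancel]
  rw [harg, pvAValid_coe]
  refine ⟨?_, pvNo3_pow10_add_one m⟩
  intro hdvd
  have hmod0 : (10 ^ m + 1) % 3 = 0 := Nat.dvd_iff_mod_eq_zero.mp hdvd
  rw [Nat.add_mod, pvPow10_mod3] at hmod0
  norm_num at hmod0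

-- shifting the start past a failing point strictly shrinks the distance to the next success
lemma pvFindStepA (a : Int) (hna : ¬ pvAValid a = true) :
    Nat.find (pvAValid_exists (a + 1)) < Nat.find (pvAValid_exists a) := by
  have hF := Nat.find_spec (pvAValid_exists a)
  have hF0 : 0 < Nat.find (pvAValid_exists a) := by
    rcases Nat.eq_zero_or_pos (Nat.find (pvAValid_exists a)) with h0 | hp
    · exfalso
      rw [h0, Nat.cast_zero, add_zero] at hF
      exact hna hF
    · exact hp
  have hQ : pvAValid ((a + 1) + ((Nat.find (pvAValid_exists a) - 1 : ℕ) : Int)) = true := by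
    have harg : (a + 1) + ((Nat.find (pvAValid_exists a) - 1 : ℕ) : Int)
        = a + ((Nat.find (pvAValid_exists a) : ℕ) : Int) := by
      rw [Nat.cast_sub hF0, Nat.cast_one]
      ring
    rw [harg]; exact hF
  exact lt_of_le_of_lt (Nat.find_min' (pvAValid_exists (a + 1)) hQ) (Nat.sub_lt hF0 one_pos)

-- small termination facts kept as named lemmas (cited by name in decreasing_by)
lemma pvToNatLt (n cnt : Int) (h : cnt < n) : (n - (cnt + 1)).toNat < (n - cnt).toNat := by
  have hpos : 0 < n - cnt := sub_pos.mpr h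
  have heq : n - (cnt + 1) = n - cnt - 1 := by ring
  rw [heq]
  exact (Int.toNat_lt_toNat hpos).mpr (sub_lt_self _ one_pos)

def solutionLoop (n cnt answer : Int) : Int :=
  if h : cnt < n then
    let cnt' := if pvAValid answer = true then cnt + 1 else cnt
    if cnt' = n then answer else solutionLoop n cnt' (answer + 1)
  else answer
termination_by ((n - cnt).toNat, Nat.find (pvAValid_exists answer))
decreasing_by
  by_cases hv : pvAValid answer = true
  · simp only [hv, dite_eq_ite, if_true]
    exact Prod.Lex.left _ _ (pvToNatLt n cnt h)
  · simp only [hv, dite_eq_ite]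
    exact Prod.Lex.right _ (pvFindStepA answer hv)

def solution (n : Int) : Int :=
  solutionLoop n 0 1

-- ===== PORT B =====
lemma pvFloordivDec (k : Int) (h : 0 < k) : (PySem.Int.floordiv k 9).toNat < k.toNat := by
  rw [PySem.Int.floordiv_eq_ediv_of_pos (by norm_num)]
  refine (Int.toNat_lt_toNat h).mpr (Int.ediv_lt_of_lt_mul (by norm_num) ?_)
  exact lt_mul_right h (by norm_num)

def from9Loop (k v p : Int) : Int :=
  if h : 0 < k then
    from9Loop (PySem.Int.floordiv k 9)
      (v + (if 3 ≤ PySem.Int.mod k 9 then PySem.Int.mod k 9 + 1 else PySem.Int.mod k 9) * p)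
      (p * 10)
  else v
termination_by k.toNat
decreasing_by exact pvFloordivDec k h

def from9 (k : Int) : Int := from9Loop k 0 1

-- Nat-level model of from9 (proof infrastructure; the port below needs it for termination)
def pvMapd (d : ℕ) : ℕ := if 3 ≤ d then d + 1 else d

def pvF9 (m : ℕ) : ℕ :=
  if _h : m = 0 then 0 else pvMapd (m % 9) + 10 * pvF9 (m / 9)
termination_by m
decreasing_by exact Nat.div_lt_self (Nat.pos_of_ne_zero _h) (by norm_num)

lemma pvF9_zero : pvF9 0 = 0 := by rw [pvF9]; simp

lemma pvF9_pos_eq (m : ℕ) (hm : m ≠ 0) : pvF9 m = pvMapd (m % 9) + 10 * pvF9 (m / 9) := by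
  rw [pvF9]; simp [hm]

lemma pvFrom9Loop_eq (k v p : Int) : from9Loop k v p = v + p * (pvF9 k.toNat : Int) := by
  by_cases hk : 0 < k
  · have hk0 : k.toNat ≠ 0 := fun h0 => (not_le.mpr hk) (Int.toNat_eq_zero.mp h0)
    rw [from9Loop, dif_pos hk]
    have hrec := pvFrom9Loop_eq (PySem.Int.floordiv k 9)
      (v + (if 3 ≤ PySem.Int.mod k 9 then PySem.Int.mod k 9 + 1 else PySem.Int.mod k 9) * p)
      (p * 10)
    rw [hrec]
    have hk' : k = (k.toNat : Int) := (Int.toNat_of_nonneg hk.le).symm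
    have hdiv : PySem.Int.floordiv k 9 = ((k.toNat / 9 : ℕ) : Int) := by
      rw [hk']; exact PySem.Int.floordiv_natCast k.toNat 9
    have hmod : PySem.Int.mod k 9 = ((k.toNat % 9 : ℕ) : Int) := by
      rw [hk']; exact PySem.Int.mod_natCast k.toNat 9
    have hmapd : (if 3 ≤ PySem.Int.mod k 9 then PySem.Int.mod k 9 + 1 else PySem.Int.mod k 9)
        = ((pvMapd (k.toNat % 9) : ℕ) : Int) := by
      rw [hmod]
      unfold pvMapd
      by_cases h3 : 3 ≤ k.toNat % 9
      · rw [if_pos (by exact_mod_cast h3), if_pos h3]; push_cast; ring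
      · rw [if_neg (by exact_mod_cast h3), if_neg h3]
    rw [hdiv, hmapd]
    have hfn : pvF9 k.toNat = pvMapd (k.toNat % 9) + 10 * pvF9 (k.toNat / 9) :=
      pvF9_pos_eq k.toNat hk0
    have htn : ((k.toNat / 9 : ℕ) : Int).toNat = k.toNat / 9 := Int.toNat_natCast _
    rw [htn, hfn]
    push_cast
    ring
  · rw [from9Loop, dif_neg hk]
    rw [Int.toNat_of_nonpos (not_lt.mp hk), pvF9_zero, Nat.cast_zero, mul_zero, add_zero]
termination_by k.toNat
decreasing_by exact pvFloordivDec k hk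

lemma pvFrom9_coe (k : Int) : from9 k = (pvF9 k.toNat : Int) := by
  rw [from9, pvFrom9Loop_eq]; ring

lemma pvF9_pow9 : ∀ m : ℕ, pvF9 (9 ^ m) = 10 ^ m := by
  intro m
  induction m with
  | zero =>
    rw [pow_zero, pvF9_pos_eq 1 (by norm_num)]
    simp [pvMapd, pvF9_zero]
  | succ m ih =>
    rw [pvF9_pos_eq _ (by positivity)]
    have h1 : 9 ^ (m + 1) % 9 = 0 := by
      simp [Nat.pow_succ, Nat.mul_mod_left]
    have h2 : 9 ^ (m + 1) / 9 = 9 ^ m := by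
      rw [Nat.pow_succ, Nat.mul_div_cancel _ (by norm_num)]
    rw [h1, h2, ih]
    simp [pvMapd]
    ring

-- there is always a later base-9 index whose image is not divisible by 3: 9^m ↦ 10^m
lemma pvGoodB_exists (x : Int) : ∃ j : ℕ, PySem.Int.mod (from9 (x + (j : Int))) 3 ≠ 0 := by
  set m : ℕ := x.toNat + 1 with hm
  have hbig : x < ((9 ^ m : ℕ) : Int) := by
    have h1 : (m : Int) < ((9 ^ m : ℕ) : Int) := by exact_mod_cast Nat.lt_pow_self (by norm_num)
    have h2 : x ≤ (x.toNat : Int) := Int.self_le_toNat x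
    have h3 : (x.toNat : Int) < (m : Int) := by exact_mod_cast Nat.lt_succ_self x.toNat
    exact lt_of_le_of_lt h2 (lt_trans h3 h1)
  refine ⟨(((9 ^ m : ℕ) : Int) - x).toNat, ?_⟩
  have harg : x + ((((9 ^ m : ℕ) : Int) - x).toNat : Int) = ((9 ^ m : ℕ) : Int) := by
    rw [Int.toNat_of_nonneg (sub_nonneg.mpr hbig.le), add_sub_cancel]
  rw [harg, pvFrom9_coe]
  have htn : ((9 ^ m : ℕ) : Int).toNat = 9 ^ m := Int.toNat_natCast _
  rw [htn, pvF9_pow9]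
  have hmn : PySem.Int.mod ((10 ^ m : ℕ) : Int) 3 = ((10 ^ m % 3 : ℕ) : Int) := by
    exact_mod_cast PySem.Int.mod_natCast (10 ^ m) 3
  rw [hmn, pvPow10_mod3]
  norm_num

-- same shrinking argument for B's index measure
lemma pvFindStepB (x : Int) (hna : PySem.Int.mod (from9 x) 3 = 0) :
    Nat.find (pvGoodB_exists (x + 1)) < Nat.find (pvGoodB_exists x) := by
  have hF := Nat.find_spec (pvGoodB_exists x)
  have hF0 : 0 < Nat.find (pvGoodB_exists x) := by
    rcases Nat.eq_zero_or_pos (Nat.find (pvGoodB_exists x)) with h0 | hp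
    · exfalso
      rw [h0, Nat.cast_zero, add_zero] at hF
      exact hF hna
    · exact hp
  have hQ : PySem.Int.mod (from9 ((x + 1) + ((Nat.find (pvGoodB_exists x) - 1 : ℕ) : Int))) 3 ≠ 0 := by
    have harg : (x + 1) + ((Nat.find (pvGoodB_exists x) - 1 : ℕ) : Int)
        = x + ((Nat.find (pvGoodB_exists x) : ℕ) : Int) := by
      rw [Nat.cast_sub hF0, Nat.cast_one]
      ring
    rw [harg]; exact hF
  exact lt_of_le_of_lt (Nat.find_min' (pvGoodB_exists (x + 1)) hQ) (Nat.sub_lt hF0 one_pos)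

def solutionAltLoop (n cnt k v : Int) : Int :=
  if h : cnt < n then
    let k' := k + 1
    let v' := from9 k'
    if PySem.Int.mod v' 3 ≠ 0 then solutionAltLoop n (cnt + 1) k' v'
    else solutionAltLoop n cnt k' v'
  else v
termination_by ((n - cnt).toNat, Nat.find (pvGoodB_exists (k + 1)))
decreasing_by
  · exact Prod.Lex.left _ _ (pvToNatLt n cnt h)
  · rename_i hbad
    exact Prod.Lex.right _ (pvFindStepB (k + 1) (not_not.mp hbad))

def solution_alt (n : Int) : Int :=
  solutionAltLoop n 0 0 1

-- ===== PRECONDITION & SPEC =====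
def Spec_solution (n : Int) (out : Int) : Prop := out = solution_alt n
instance (n : Int) (out : Int) : Decidable (Spec_solution n out) := by unfold Spec_solution; infer_instance

-- ===== CLAIM (what is proved, stated in full; the proofs are below) =====
def Claim_equal_solution : Prop := ∀ (n : Int), Dom_solution n → Spec_solution n (solution n)

-- ===== LEMMAS AND PROOFS =====

lemma pvF9_lt_succ (m : ℕ) : pvF9 m < pvF9 (m + 1) := by
  induction m using Nat.strong_induction_on with
  | _ m ih =>
    rcases Nat.eq_zero_or_pos m with h0 | hpos
    · subst h0
      rw [pvF9_zero, pvF9_pos_eq 1 (by norm_num)]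
      simp [pvMapd, pvF9_zero]
    · by_cases h8 : m % 9 = 8
      · have hm1 : (m + 1) % 9 = 0 := by omega
        have hd1 : (m + 1) / 9 = m / 9 + 1 := by omega
        rw [pvF9_pos_eq m (by omega), pvF9_pos_eq (m + 1) (by omega), h8, hm1, hd1]
        have hih : pvF9 (m / 9) < pvF9 (m / 9 + 1) := ih (m / 9) (Nat.div_lt_self hpos (by norm_num))
        simp [pvMapd]
        omega
      · have hm1 : (m + 1) % 9 = m % 9 + 1 := by omega
        have hd1 : (m + 1) / 9 = m / 9 := by omega
        rw [pvF9_pos_eq m (by omega), pvF9_pos_eq (m + 1) (by omega), hm1, hd1]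
        have hmap : pvMapd (m % 9) < pvMapd (m % 9 + 1) := by
          unfold pvMapd
          split_ifs <;> omega
        omega

lemma pvF9_mono : StrictMono pvF9 :=
  strictMono_nat_of_lt_succ pvF9_lt_succ

lemma pvF9_no3 (m : ℕ) : 3 ∉ Nat.digits 10 (pvF9 m) := by
  induction m using Nat.strong_induction_on with
  | _ m ih =>
    rcases Nat.eq_zero_or_pos m with h0 | hpos
    · subst h0
      rw [pvF9_zero]
      simp
    · rw [pvF9_pos_eq m (by omega)]
      have hmap_lt : pvMapd (m % 9) < 10 := by unfold pvMapd; split_ifs <;> omega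
      by_cases hz : pvMapd (m % 9) + 10 * pvF9 (m / 9) = 0
      · rw [hz]; simp
      · rw [Nat.digits_def' (by norm_num : (1:ℕ) < 10) (by omega)]
        have hmod : (pvMapd (m % 9) + 10 * pvF9 (m / 9)) % 10 = pvMapd (m % 9) := by omega
        have hdiv : (pvMapd (m % 9) + 10 * pvF9 (m / 9)) / 10 = pvF9 (m / 9) := by omega
        rw [hmod, hdiv]
        intro hmem
        rcases List.mem_cons.mp hmem with hc | hc
        · have hne : pvMapd (m % 9) ≠ 3 := by unfold pvMapd; split_ifs <;> omega
          exact hne hc.symm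
        · exact ih (m / 9) (Nat.div_lt_self hpos (by norm_num)) hc

def pvT9 (m : ℕ) : ℕ :=
  if _h : m = 0 then 0
  else (if 4 ≤ m % 10 then m % 10 - 1 else m % 10) + 9 * pvT9 (m / 10)
termination_by m
decreasing_by exact Nat.div_lt_self (Nat.pos_of_ne_zero _h) (by norm_num)

lemma pvT9_zero : pvT9 0 = 0 := by rw [pvT9]; simp

lemma pvT9_pos_eq (m : ℕ) (hm : m ≠ 0) :
    pvT9 m = (if 4 ≤ m % 10 then m % 10 - 1 else m % 10) + 9 * pvT9 (m / 10) := by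
  rw [pvT9]; simp [hm]

lemma pvT9_pos (m : ℕ) (hm : 0 < m) : 0 < pvT9 m := by
  induction m using Nat.strong_induction_on with
  | _ m ih =>
    rw [pvT9_pos_eq m (by omega)]
    by_cases hd : m % 10 = 0
    · have hq : 0 < m / 10 := by omega
      have := ih (m / 10) (Nat.div_lt_self hm (by norm_num)) hq
      omega
    · split_ifs <;> omega

lemma pvF9_pvT9 (v : ℕ) (h3 : 3 ∉ Nat.digits 10 v) : pvF9 (pvT9 v) = v := by
  induction v using Nat.strong_induction_on with
  | _ v ih =>
    rcases Nat.eq_zero_or_pos v with h0 | hpos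
    · subst h0
      rw [pvT9_zero, pvF9_zero]
    · rw [Nat.digits_def' (by norm_num : (1:ℕ) < 10) hpos] at h3
      simp only [List.mem_cons] at h3
      obtain ⟨hd3, h3'⟩ := not_or.mp h3
      have hdlt : v % 10 < 10 := Nat.mod_lt v (by norm_num)
      rw [pvT9_pos_eq v (by omega)]
      have hu8 : (if 4 ≤ v % 10 then v % 10 - 1 else v % 10) ≤ 8 := by split_ifs <;> omega
      have hmapd : pvMapd (if 4 ≤ v % 10 then v % 10 - 1 else v % 10) = v % 10 := by
        unfold pvMapd
        split_ifs <;> omega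
      by_cases hq : (if 4 ≤ v % 10 then v % 10 - 1 else v % 10) + 9 * pvT9 (v / 10) = 0
      · exfalso
        have hu0 : (if 4 ≤ v % 10 then v % 10 - 1 else v % 10) = 0 := by omega
        have hd0 : v % 10 = 0 := by
          rw [hu0] at hmapd
          simpa [pvMapd] using hmapd.symm
        have hv10 : 0 < v / 10 := by omega
        have := pvT9_pos (v / 10) hv10
        omega
      · rw [pvF9_pos_eq _ hq]
        have hmod9 : ((if 4 ≤ v % 10 then v % 10 - 1 else v % 10) + 9 * pvT9 (v / 10)) % 9
            = (if 4 ≤ v % 10 then v % 10 - 1 else v % 10) := by omega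
        have hdiv9 : ((if 4 ≤ v % 10 then v % 10 - 1 else v % 10) + 9 * pvT9 (v / 10)) / 9
            = pvT9 (v / 10) := by omega
        rw [hmod9, hdiv9, hmapd, ih (v / 10) (Nat.div_lt_self hpos (by norm_num)) h3']
        omega

-- numbers strictly between consecutive images of pvF9 contain the digit 3
lemma pvGap (K x : ℕ) (h1 : pvF9 K < x) (h2 : x < pvF9 (K + 1)) : 3 ∈ Nat.digits 10 x := by
  by_contra h3
  have := pvF9_pvT9 x h3
  have hlt1 : K < pvT9 x := by
    have := pvF9_mono.lt_iff_lt (a := K) (b := pvT9 x)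
    omega
  have hlt2 : pvT9 x < K + 1 := by
    have := pvF9_mono.lt_iff_lt (a := pvT9 x) (b := K + 1)
    omega
  omega

-- A's scan skips every number failing its test without changing state
lemma pvScanA (n cnt : Int) (hcn : cnt < n) : ∀ (a b : Int), a ≤ b →
    (∀ x : Int, a ≤ x → x < b → pvAValid x = false) →
    solutionLoop n cnt a = solutionLoop n cnt b := by
  intro a b hab hbad
  suffices H : ∀ (d : ℕ) (a : Int), a ≤ b → (b - a).toNat = d →
      (∀ x : Int, a ≤ x → x < b → pvAValid x = false) →
      solutionLoop n cnt a = solutionLoop n cnt b by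
    exact H (b - a).toNat a hab rfl hbad
  intro d
  induction d with
  | zero =>
    intro a hab hd _
    have : a = b := by omega
    rw [this]
  | succ d ihd =>
    intro a hab hd hbad'
    have hlt : a < b := by omega
    have hfa : pvAValid a = false := hbad' a le_rfl hlt
    conv_lhs => rw [solutionLoop]
    rw [dif_pos hcn]
    simp only [hfa, Bool.false_eq_true, if_false]
    rw [if_neg (by omega : ¬ cnt = n)]
    exact ihd (a + 1) (by omega) (by omega) (fun x hx1 hx2 => hbad' x (by omega) hx2)

-- simulation: A starting just past the k-th no-3 number equals B at index k
-- the two loop tests agree at a no-3 number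
lemma pvAValid_from9 (k : Int) (hk : 0 ≤ k) :
    pvAValid (from9 (k + 1)) = true ↔ PySem.Int.mod (from9 (k + 1)) 3 ≠ 0 := by
  have htn : (k + 1).toNat = k.toNat + 1 := by omega
  rw [pvFrom9_coe (k + 1), htn, pvAValid_coe]
  constructor
  · intro ⟨hnd, _⟩ hm0
    rw [PySem.Int.mod_eq_zero_iff_dvd] at hm0
    exact hnd (by exact_mod_cast hm0)
  · intro hm0
    refine ⟨?_, pvF9_no3 _⟩
    intro hdvd
    exact hm0 (by rw [PySem.Int.mod_eq_zero_iff_dvd]; exact_mod_cast hdvd)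

-- every integer strictly between consecutive images of from9 fails A's test
lemma pvGapI (k x : Int) (hk : 0 ≤ k) (h1 : from9 k < x) (h2 : x < from9 (k + 1)) :
    pvAValid x = false := by
  have htn : (k + 1).toNat = k.toNat + 1 := by omega
  have hx0 : 0 ≤ x := by
    have := pvFrom9_coe k
    omega
  have hxn : x = ((x.toNat : ℕ) : Int) := by omega
  rw [pvFrom9_coe k] at h1
  rw [pvFrom9_coe (k + 1), htn] at h2
  have hg1 : pvF9 k.toNat < x.toNat := by omega
  have hg2 : x.toNat < pvF9 (k.toNat + 1) := by omega
  have h3 := pvGap k.toNat x.toNat hg1 hg2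
  cases hb : pvAValid x with
  | false => rfl
  | true =>
    exfalso
    rw [hxn] at hb
    exact ((pvAValid_coe x.toNat).mp hb).2 h3

lemma pvSim (n : Int) : ∀ (cnt k v : Int), 0 ≤ k → cnt < n →
    solutionLoop n cnt (from9 k + 1) = solutionAltLoop n cnt k v := by
  intro cnt k v
  induction cnt, k, v using solutionAltLoop.induct (n := n) with
  | case1 cnt k v hcn k' v' hmod ih =>
    intro hk _
    -- (hmod, ih already zeta-reduced)
    have hmono : from9 k + 1 ≤ from9 (k + 1) := by
      have h1 := pvFrom9_coe k
      have h2 := pvFrom9_coe (k + 1)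
      have htn : (k + 1).toNat = k.toNat + 1 := by omega
      rw [htn] at h2
      have := pvF9_lt_succ k.toNat
      omega
    have hscan := pvScanA n cnt hcn (from9 k + 1) (from9 (k + 1)) hmono
      (fun x hx1 hx2 => pvGapI k x hk (by omega) hx2)
    rw [hscan]
    have hvalid : pvAValid (from9 (k + 1)) = true := (pvAValid_from9 k hk).mpr hmod
    conv_lhs => rw [solutionLoop]
    rw [dif_pos hcn]
    simp only [hvalid, if_true]
    conv_rhs => rw [solutionAltLoop]
    rw [dif_pos hcn]
    rw [if_pos (show PySem.Int.mod (from9 (k + 1)) 3 ≠ 0 from hmod)]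
    by_cases hend : cnt + 1 = n
    · rw [if_pos hend]
      conv_rhs => rw [solutionAltLoop]
      rw [dif_neg (by omega : ¬ cnt + 1 < n)]
    · rw [if_neg hend]
      exact ih (by omega) (by omega)
  | case2 cnt k v hcn k' v' hmod ih =>
    intro hk _
    -- (hmod, ih already zeta-reduced)
    have hinv : pvAValid (from9 (k + 1)) = false := by
      cases hb : pvAValid (from9 (k + 1)) with
      | false => rfl
      | true => exact absurd ((pvAValid_from9 k hk).mp hb) hmod
    have hmono : from9 k + 1 ≤ from9 (k + 1) + 1 := by
      have h1 := pvFrom9_coe k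
      have h2 := pvFrom9_coe (k + 1)
      have htn : (k + 1).toNat = k.toNat + 1 := by omega
      rw [htn] at h2
      have := pvF9_lt_succ k.toNat
      omega
    have hscan := pvScanA n cnt hcn (from9 k + 1) (from9 (k + 1) + 1) hmono
      (fun x hx1 hx2 => by
        by_cases hx : x = from9 (k + 1)
        · rw [hx]; exact hinv
        · exact pvGapI k x hk (by omega) (by omega))
    rw [hscan]
    conv_rhs => rw [solutionAltLoop]
    rw [dif_pos hcn]
    rw [if_neg (show ¬ PySem.Int.mod (from9 (k + 1)) 3 ≠ 0 from hmod)]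
    exact ih (by omega) (by omega)
  | case3 cnt k v hcn =>
    intro _ hcn'
    exact absurd hcn' hcn

theorem pvMain (n : Int) : solution n = solution_alt n := by
  rw [solution, solution_alt]
  by_cases hn : (0 : Int) < n
  · have h0 : from9 0 = 0 := by rw [pvFrom9_coe]; simp [pvF9_zero]
    have := pvSim n 0 0 1 le_rfl hn
    rw [h0] at this
    simpa using this
  · rw [solutionLoop, solutionAltLoop]
    rw [dif_neg (by omega), dif_neg (by omega)]

-- ===== VERDICT (by name: the statement is the Claim_ definition above) =====
theorem solution_spec : Claim_equal_solution := by
  intro n _ 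
  unfold Spec_solution
  exact pvMain n
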